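-- pv_equiv track=rewrite | github.com/kh277/BOJ | 백준/Gold/14461. 소가 길을 건너간 이유 7/소가 길을 건너간 이유 7.py | solve
-- ===== SOURCE A (Python) =====
-- import heapq
--
-- INF = 10**20
--
-- dx = [-3, -2, -2, -1, -1, -1, 0, 0, 0, 0, 1, 1, 1, 2, 2, 3]
--
-- dy = [0, -1, 1, -2, 0, 2, -3, -1, 1, 3, -2, 0, 2, -1, 1, 0]
--
-- def Dijkstra(V, graph, start):
--     pq = []
--     distance = [INF for _ in range(V)]
--     distance[start] = 0
--     heapq.heappush(pq, (0, start))
--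
--     while pq:
--         curDist, curV = heapq.heappop(pq)
--
--         if distance[curV] < curDist:
--             continue
--
--         for tempDist, nextV in graph[curV]:
--             nextDist = curDist + tempDist
--             if nextDist < distance[nextV]:
--                 distance[nextV] = nextDist
--                 heapq.heappush(pq, (nextDist, nextV))
--
--     return distance
--
-- def solve(N, T, grid):
--     # 이동할 수 있는 1칸, 3칸을 전부 간선으로 저장하여 그래프 형성
--     graph = [[] for _ in range(N*N)]
--     for curY in range(N):
--         for curX in range(N):
--             curV = N*curY + curX
--             for i in range(16):
--                 nextX = curX + dx[i]
--                 nextY = curY + dy[i]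
--                 nextV = N*nextY + nextX
--                 if 0 <= nextX < N and 0 <= nextY < N:
--                     graph[curV].append((T*3+grid[nextY][nextX], nextV))
--
--     # 다익스트라로 최단거리 도출
--     dist = Dijkstra(N*N, graph, 0)
--
--     # 도착점에서 1~2칸 떨어진 곳에서 이동하는 경우
--     result = dist[N*N-1]
--     for i in [N*N-3, N*N-N-2, N*N-2*N-1]:
--         result = min(result, dist[i] + T*2)
--     for i in [N*N-2, N*N-N-1]:
--         result = min(result, dist[i] + T)
--
--     return result
-- ===== SOURCE B (Python) =====
-- INF = 10**20
--
-- dx = [-3, -2, -2, -1, -1, -1, 0, 0, 0, 0, 1, 1, 1, 2, 2, 3]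
-- dy = [0, -1, 1, -2, 0, 2, -3, -1, 1, 3, -2, 0, 2, -1, 1, 0]
--
-- def solve(N, T, grid):
--     # SPFA (queue-based Bellman-Ford): a plain FIFO queue of vertices, no
--     # priority queue, no (distance, vertex) tags, no stale-entry skipping.
--     dist = [INF] * (N * N)
--     dist[0] = 0
--     queue = [0]
--     while queue:
--         u = queue.pop(0)
--         uy, ux = divmod(u, N)
--         du = dist[u]
--         for i in range(16):
--             nx = ux + dx[i]
--             ny = uy + dy[i]
--             if 0 <= nx < N and 0 <= ny < N:
--                 v = N * ny + nx
--                 nd = du + T * 3 + grid[ny][nx]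
--                 if nd < dist[v]:
--                     dist[v] = nd
--                     if v not in queue:
--                         queue.append(v)
--
--     result = dist[N * N - 1]
--     for i in [N * N - 3, N * N - N - 2, N * N - 2 * N - 1]:
--         result = min(result, dist[i] + T * 2)
--     for i in [N * N - 2, N * N - N - 1]:
--         result = min(result, dist[i] + T)
--     return result
-- ===== Notes on version B (the rewrite author's own statement) =====
-- stated objective: alternative
-- what changed: B replaces A's adjacency-list-plus-binary-heap Dijkstra by SPFA (queue-based Bellman-Ford): a plain FIFO list of vertices with no priority queue, no (distance,vertex) tags and no stale-entry skipping, relaxing each popped vertex's 16 knight-like moves with its current distance; with the non-negative move costs required by Pre_ both label-setting and label-correcting converge to the same shortest distances.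
-- outside the precondition, e.g. on solve(2, 0, [[0, 5], [5, -1]]): A returns 0, B returns 0
import Mathlib
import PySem

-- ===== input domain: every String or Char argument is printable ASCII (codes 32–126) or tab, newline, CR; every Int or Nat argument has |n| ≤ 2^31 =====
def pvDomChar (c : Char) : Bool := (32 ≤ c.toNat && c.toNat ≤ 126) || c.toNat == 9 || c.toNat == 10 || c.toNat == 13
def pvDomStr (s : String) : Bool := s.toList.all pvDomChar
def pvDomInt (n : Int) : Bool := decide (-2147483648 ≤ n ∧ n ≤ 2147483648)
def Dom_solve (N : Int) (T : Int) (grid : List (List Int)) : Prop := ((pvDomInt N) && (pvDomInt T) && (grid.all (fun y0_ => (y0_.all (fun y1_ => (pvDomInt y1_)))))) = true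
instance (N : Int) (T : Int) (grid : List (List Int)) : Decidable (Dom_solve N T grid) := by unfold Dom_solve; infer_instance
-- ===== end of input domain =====

-- B replaces A's adjacency-list-plus-binary-heap Dijkstra by SPFA (queue-based
-- Bellman-Ford): a plain FIFO list of vertices, no priority queue, no (distance,
-- vertex) tags, no stale-entry skipping (objective: alternative algorithm).

-- ===== PORT A =====

def pvINF : Int := 10^20

-- Python tuple comparison (a, b) < (c, d) on int pairs (lexicographic)
def pvLt (a b : Int × Int) : Bool := a.1 < b.1 || (a.1 == b.1 && a.2 < b.2)

-- Python list item assignment xs[i] = v; every call site below provably has 0 ≤ i < len(xs)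
def pySetI (xs : List Int) (i : Int) (v : Int) : List Int := xs.set i.toNat v

-- heapq._siftdown(heap, startpos, pos) with newitem = heap[pos] passed explicitly;
-- fuel = pos suffices (pos strictly decreases); internal heap positions are always in range,
-- so List.getD's default (0, 0) is never read at a call site
def pvSiftdown : Nat → List (Int × Int) → Nat → Nat → (Int × Int) → List (Int × Int)
  | 0, heap, _, pos, newitem => heap.set pos newitem
  | fuel + 1, heap, startpos, pos, newitem =>
    if startpos < pos then
      let parentpos := (pos - 1) / 2
      let parent := heap.getD parentpos (0, 0)
      if pvLt newitem parent then pvSiftdown fuel (heap.set pos parent) startpos parentpos newitem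
      else heap.set pos newitem
    else heap.set pos newitem

-- heapq.heappush(heap, item): append, then sift down from the new last slot
def pvHeappush (heap : List (Int × Int)) (item : Int × Int) : List (Int × Int) :=
  pvSiftdown heap.length (heap ++ [item]) 0 heap.length item

-- the while-loop of heapq._siftup; fuel = endpos suffices (pos strictly increases, pos < endpos)
def pvSiftupLoop : Nat → List (Int × Int) → Nat → Nat → (Int × Int) → Nat → List (Int × Int)
  | 0, heap, _, pos, newitem, _ => heap.set pos newitem
  | fuel + 1, heap, startpos, pos, newitem, endpos =>
    let childpos := 2 * pos + 1
    if childpos < endpos then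
      let childpos := if childpos + 1 < endpos ∧ pvLt (heap.getD childpos (0, 0)) (heap.getD (childpos + 1) (0, 0)) = false then childpos + 1 else childpos
      pvSiftupLoop fuel (heap.set pos (heap.getD childpos (0, 0))) startpos childpos newitem endpos
    else pvSiftdown pos (heap.set pos newitem) startpos pos newitem

-- heapq._siftup(heap, pos)
def pvSiftup (heap : List (Int × Int)) (pos : Nat) : List (Int × Int) :=
  pvSiftupLoop heap.length heap pos pos (heap.getD pos (0, 0)) heap.length

-- heapq.heappop(heap); none = IndexError on an empty heap (the loops below only pop non-empty heaps)
def pvHeappop (heap : List (Int × Int)) : Option ((Int × Int) × List (Int × Int)) :=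
  match heap.getLast? with
  | none => none
  | some lastelt =>
    let rest := heap.dropLast
    if rest.isEmpty then some (lastelt, rest)
    else some (rest.getD 0 (0, 0), pvSiftup (rest.set 0 lastelt) 0)

-- fuel for the while-loops of both ports: under Pre_solve (non-negative move costs) each loop
-- does at most 2·N²·INF + 1 iterations (proved below), far below 2^200; both ports run on it
def pvFuel : Nat := 2 ^ 200

def pvDx : List Int := [-3, -2, -2, -1, -1, -1, 0, 0, 0, 0, 1, 1, 1, 2, 2, 3]
def pvDy : List Int := [0, -1, 1, -2, 0, 2, -3, -1, 1, 3, -2, 0, 2, -1, 1, 0]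

-- graph[curV].append(e); curV is provably ≥ 0 and < len(graph) at every call site
def pyAppendAt (g : List (List (Int × Int))) (i : Int) (e : Int × Int) : List (List (Int × Int)) :=
  g.set i.toNat (g.getD i.toNat [] ++ [e])

-- the 'for i in range(16)' body of A's graph construction
def pvInner (N T : Int) (grid : List (List Int)) (curY curX : Int) (g : List (List (Int × Int))) : List (List (Int × Int)) :=
  (PySem.List.pyRange 0 16 1).foldl (fun g i =>
    let nextX := curX + PySem.List.pyGetD pvDx i 0
    let nextY := curY + PySem.List.pyGetD pvDy i 0
    let nextV := N * nextY + nextX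
    if (0 ≤ nextX ∧ nextX < N) ∧ (0 ≤ nextY ∧ nextY < N) then
      pyAppendAt g (N * curY + curX) (T * 3 + PySem.List.pyGetD (PySem.List.pyGetD grid nextY []) nextX 0, nextV)
    else g) g

def pvRow (N T : Int) (grid : List (List Int)) (curY : Int) (g : List (List (Int × Int))) : List (List (Int × Int)) :=
  (PySem.List.pyRange 0 N 1).foldl (fun g curX => pvInner N T grid curY curX g) g

-- graph = [[] for _ in range(N*N)] followed by A's three nested loops
def pvBuildGraph (N T : Int) (grid : List (List Int)) : List (List (Int × Int)) :=
  (PySem.List.pyRange 0 N 1).foldl (fun g curY => pvRow N T grid curY g)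
    ((PySem.List.pyRange 0 (N * N) 1).map (fun _ => ([] : List (Int × Int))))

-- the relaxation body of A's Dijkstra: state is (pq, distance)
def pvRelax (curDist : Int) (s : List (Int × Int) × List Int) (e : Int × Int) : List (Int × Int) × List Int :=
  let nextDist := curDist + e.1
  if nextDist < PySem.List.pyGetD s.2 e.2 0 then
    (pvHeappush s.1 (nextDist, e.2), pySetI s.2 e.2 nextDist)
  else s

-- the 'while pq' loop of Dijkstra; distance[curV] is in range whenever pq holds in-range vertices
def pvDijkstraLoop (graph : List (List (Int × Int))) : Nat → List (Int × Int) → List Int → List Int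
  | 0, _, distance => distance
  | fuel + 1, pq, distance =>
    match pvHeappop pq with
    | none => distance
    | some ((curDist, curV), pq') =>
      if PySem.List.pyGetD distance curV 0 < curDist then pvDijkstraLoop graph fuel pq' distance
      else
        let s := (PySem.List.pyGetD graph curV []).foldl (pvRelax curDist) (pq', distance)
        pvDijkstraLoop graph fuel s.1 s.2

def pvDijkstra (V : Int) (graph : List (List (Int × Int))) (start : Int) : List Int :=
  let distance := (PySem.List.pyRange 0 V 1).map (fun _ => pvINF)
  let distance := pySetI distance start 0
  let pq := pvHeappush [] (0, start)
  pvDijkstraLoop graph pvFuel pq distance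

def solve (N : Int) (T : Int) (grid : List (List Int)) : Int :=
  let graph := pvBuildGraph N T grid
  let dist := pvDijkstra (N * N) graph 0
  let result := PySem.List.pyGetD dist (N * N - 1) 0
  let result := ([N * N - 3, N * N - N - 2, N * N - 2 * N - 1] : List Int).foldl
    (fun r i => min r (PySem.List.pyGetD dist i 0 + T * 2)) result
  ([N * N - 2, N * N - N - 1] : List Int).foldl
    (fun r i => min r (PySem.List.pyGetD dist i 0 + T)) result

-- ===== PORT B =====

-- the 'for i in range(16)' body of B's SPFA: state is (queue, dist)
def pvSpfaStep (N T : Int) (grid : List (List Int)) (uy ux du : Int) (s : List Int × List Int) (i : Int) : List Int × List Int :=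
  let nx := ux + PySem.List.pyGetD pvDx i 0
  let ny := uy + PySem.List.pyGetD pvDy i 0
  if (0 ≤ nx ∧ nx < N) ∧ (0 ≤ ny ∧ ny < N) then
    let v := N * ny + nx
    let nd := du + T * 3 + PySem.List.pyGetD (PySem.List.pyGetD grid ny []) nx 0
    if nd < PySem.List.pyGetD s.2 v 0 then
      (if v ∈ s.1 then s.1 else s.1 ++ [v], pySetI s.2 v nd)
    else s
  else s

-- B's 'while queue' loop: pop the front vertex, relax its 16 moves with its current distance
def pvSpfaLoop (N T : Int) (grid : List (List Int)) : Nat → List Int → List Int → List Int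
  | 0, _, dist => dist
  | fuel + 1, q, dist =>
    match q with
    | [] => dist
    | u :: q' =>
      let uy := PySem.Int.floordiv u N
      let ux := PySem.Int.mod u N
      let du := PySem.List.pyGetD dist u 0
      let s := (PySem.List.pyRange 0 16 1).foldl (pvSpfaStep N T grid uy ux du) (q', dist)
      pvSpfaLoop N T grid fuel s.1 s.2

def solve_alt (N : Int) (T : Int) (grid : List (List Int)) : Int :=
  let dist := pySetI (List.replicate (N * N).toNat pvINF) 0 0
  let dist := pvSpfaLoop N T grid pvFuel [0] dist
  let result := PySem.List.pyGetD dist (N * N - 1) 0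
  let result := ([N * N - 3, N * N - N - 2, N * N - 2 * N - 1] : List Int).foldl
    (fun r i => min r (PySem.List.pyGetD dist i 0 + T * 2)) result
  ([N * N - 2, N * N - N - 1] : List Int).foldl
    (fun r i => min r (PySem.List.pyGetD dist i 0 + T)) result

-- ===== PRECONDITION & SPEC =====

-- Pre_ excludes N < 2 and grids missing a row/column of the N×N block (A raises IndexError there),
-- and move costs 3·T + cell < 0, where A's lazy Dijkstra loops forever on the induced negative
-- cycles (on a few such inputs A does return; B then returns the same value — see the cite).
def Pre_solve (N : Int) (T : Int) (grid : List (List Int)) : Prop :=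
  2 ≤ N ∧ N ≤ (grid.length : Int) ∧
  ∀ row ∈ grid.take N.toNat, N ≤ (row.length : Int) ∧ ∀ e ∈ row.take N.toNat, 0 ≤ 3 * T + e
instance (N : Int) (T : Int) (grid : List (List Int)) : Decidable (Pre_solve N T grid) := by
  unfold Pre_solve; infer_instance

def pvWitness_solve : Int × Int × List (List Int) := (2, 1, [[0, 0], [0, 0]])

def Spec_solve (N : Int) (T : Int) (grid : List (List Int)) (out : Int) : Prop := out = solve_alt N T grid
instance (N : Int) (T : Int) (grid : List (List Int)) (out : Int) : Decidable (Spec_solve N T grid out) := by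
  unfold Spec_solve; infer_instance

-- ===== CLAIM (what is proved, stated in full; the proofs are below) =====
def Claim_equal_solve : Prop := ∀ (N : Int) (T : Int) (grid : List (List Int)), Dom_solve N T grid → Pre_solve N T grid → Spec_solve N T grid (solve N T grid)

-- ===== LEMMAS AND PROOFS =====

-- dist lookup at a (non-negative) Int vertex
def pvDg (d : List Int) (v : Int) : Int := d.getD v.toNat 0

-- the per-cell edge list both programs traverse
def pvEdges (N T : Int) (grid : List (List Int)) (y x : Int) : List (Int × Int) :=
  (PySem.List.pyRange 0 16 1).filterMap (fun i =>
    let nextX := x + PySem.List.pyGetD pvDx i 0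
    let nextY := y + PySem.List.pyGetD pvDy i 0
    if (0 ≤ nextX ∧ nextX < N) ∧ (0 ≤ nextY ∧ nextY < N) then
      some (T * 3 + PySem.List.pyGetD (PySem.List.pyGetD grid nextY []) nextX 0, N * nextY + nextX)
    else none)

-- the graph relation: an edge of weight w from vertex u to vertex v
def pvEdge (N T : Int) (grid : List (List Int)) (u v w : Int) : Prop :=
  0 ≤ u ∧ u < N * N ∧ (w, v) ∈ pvEdges N T grid (PySem.Int.floordiv u N) (PySem.Int.mod u N)

-- v is reachable from vertex 0 by a walk of total cost c
inductive pvReach (N T : Int) (grid : List (List Int)) : Int → Int → Prop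
  | zero : pvReach N T grid 0 0
  | step : ∀ {u c v w}, pvReach N T grid u c → pvEdge N T grid u v w → pvReach N T grid v (c + w)

-- state facts about the dist array shared by both loops
def pvCore (N T : Int) (grid : List (List Int)) (d : List Int) : Prop :=
  d.length = (N * N).toNat ∧ pvDg d 0 = 0 ∧
  ∀ v : Int, 0 ≤ v → v < N * N →
    0 ≤ pvDg d v ∧ pvDg d v ≤ pvINF ∧ (pvDg d v = pvINF ∨ pvReach N T grid v (pvDg d v))

-- what both loops compute: the unique fixpoint of relaxation realized by walks
def pvPost (N T : Int) (grid : List (List Int)) (d : List Int) : Prop :=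
  pvCore N T grid d ∧
  ∀ u v w : Int, pvEdge N T grid u v w → pvDg d v ≤ pvDg d u + w

theorem pv_getD_set_self {α : Type} (l : List α) (i : Nat) (a d : α) (h : i < l.length) :
    (l.set i a).getD i d = a := by simp [List.getD, h]

theorem pv_getD_set_ne {α : Type} (l : List α) (i j : Nat) (a d : α) (h : i ≠ j) :
    (l.set i a).getD j d = l.getD j d := by simp [List.getD, List.getElem?_set_ne h]

theorem pv_getD_oob {α : Type} (l : List α) (i : Nat) (d : α) (h : l.length ≤ i) :
    l.getD i d = d := by simp [List.getD, List.getElem?_eq_none h]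

theorem pv_mem_getD {α : Type} (l : List α) (i : Nat) (d : α) :
    l.getD i d ∈ l ∨ l.getD i d = d := by
  by_cases h : i < l.length
  · left; rw [List.getD_eq_getElem _ _ h]; exact List.getElem_mem h
  · right; exact pv_getD_oob _ _ _ (by omega)

theorem pv_len_pyRange (m : Int) : (PySem.List.pyRange 0 m 1).length = m.toNat := by
  rcases m with n | n
  · simp only [Int.ofNat_eq_natCast]
    rw [PySem.List.pyRange_zero_natCast]; simp
  · rw [PySem.List.pyRange_one_eq_nil (by omega)]; simp

theorem foldl_guard_append {α : Type} (k : Nat) (c : α → Prop) [DecidablePred c] (m : α → Int × Int) :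
    ∀ (L : List α) (g : List (List (Int × Int))),
      L.foldl (fun g o => if c o then g.set k (g.getD k [] ++ [m o]) else g) g
        = g.set k (g.getD k [] ++ L.filterMap (fun o => if c o then some (m o) else none)) := by
  intro L
  induction L with
  | nil =>
    intro g
    by_cases hk : k < g.length
    · simp only [List.foldl_nil, List.filterMap_nil, List.append_nil]
      rw [List.getD_eq_getElem _ _ hk]
      exact (List.set_getElem_self hk).symm
    · rw [Nat.not_lt] at hk
      simp only [List.foldl_nil, List.filterMap_nil, List.append_nil,
        List.set_eq_of_length_le hk]
  | cons a L ih =>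
    intro g
    by_cases hk : k < g.length
    · by_cases hc : c a
      · simp only [List.foldl_cons, List.filterMap_cons, if_pos hc]
        rw [ih]
        rw [pv_getD_set_self _ _ _ _ hk, List.set_set]
        simp
      · simp only [List.foldl_cons, List.filterMap_cons, if_neg hc]
        exact ih g
    · rw [Nat.not_lt] at hk
      have hset : ∀ v, g.set k v = g := fun v => List.set_eq_of_length_le hk
      by_cases hc : c a
      · simp only [List.foldl_cons, List.filterMap_cons, if_pos hc, hset]
        rw [ih g, hset _]
      · simp only [List.foldl_cons, List.filterMap_cons, if_neg hc]
        exact ih g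

theorem pvInner_eq (N T : Int) (grid : List (List Int)) (curY curX : Int) (g : List (List (Int × Int))) :
    pvInner N T grid curY curX g =
      g.set (N * curY + curX).toNat
        (g.getD (N * curY + curX).toNat [] ++ pvEdges N T grid curY curX) := by
  unfold pvInner pvEdges
  exact foldl_guard_append (N * curY + curX).toNat
    (fun i => (0 ≤ curX + PySem.List.pyGetD pvDx i 0 ∧ curX + PySem.List.pyGetD pvDx i 0 < N) ∧
              (0 ≤ curY + PySem.List.pyGetD pvDy i 0 ∧ curY + PySem.List.pyGetD pvDy i 0 < N))
    (fun i => (T * 3 + PySem.List.pyGetD (PySem.List.pyGetD grid (curY + PySem.List.pyGetD pvDy i 0) []) (curX + PySem.List.pyGetD pvDx i 0) 0,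
               N * (curY + PySem.List.pyGetD pvDy i 0) + (curX + PySem.List.pyGetD pvDx i 0)))
    (PySem.List.pyRange 0 16 1) g

theorem len_pvInner (N T : Int) (grid : List (List Int)) (curY curX : Int) (g : List (List (Int × Int))) :
    (pvInner N T grid curY curX g).length = g.length := by
  rw [pvInner_eq]; exact List.length_set

theorem len_row_foldl (N T : Int) (grid : List (List Int)) (curY : Int) :
    ∀ (L : List Int) (g : List (List (Int × Int))),
      (L.foldl (fun g curX => pvInner N T grid curY curX g) g).length = g.length := by
  intro L
  induction L with
  | nil => intro g; rfl
  | cons a L ih => intro g; rw [List.foldl_cons, ih, len_pvInner]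

theorem len_pvRow (N T : Int) (grid : List (List Int)) (curY : Int) (g : List (List (Int × Int))) :
    (pvRow N T grid curY g).length = g.length := len_row_foldl N T grid curY _ g

theorem pvRowAux (N T : Int) (grid : List (List Int)) (curY : Int) (hN : 0 < N) (hY : 0 ≤ curY) :
    ∀ (n : Nat) (a : Int), 0 ≤ a → (N - a).toNat = n →
    ∀ (g : List (List (Int × Int))) (v : Int), 0 ≤ v →
    ((PySem.List.pyRange a N 1).foldl (fun g curX => pvInner N T grid curY curX g) g).getD v.toNat []
      = if a ≤ v - N * curY ∧ v - N * curY < N ∧ v.toNat < g.length then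
          g.getD v.toNat [] ++ pvEdges N T grid curY (v - N * curY)
        else g.getD v.toNat [] := by
  intro n
  induction n with
  | zero =>
    intro a ha hn g v hv
    have haN : N ≤ a := by omega
    rw [PySem.List.pyRange_one_eq_nil haN, List.foldl_nil, if_neg]
    rintro ⟨h1, h2, _⟩; linarith
  | succ n ih =>
    intro a ha hn g v hv
    have haN : a < N := by omega
    have hP : 0 ≤ N * curY := mul_nonneg (le_of_lt hN) hY
    rw [PySem.List.pyRange_one_cons haN, List.foldl_cons,
      ih (a + 1) (by omega) (by omega) _ v hv]
    rw [pvInner_eq, List.length_set]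
    generalize hPdef : N * curY = P
    rw [hPdef] at hP
    by_cases hva : v = P + a
    · by_cases hlen : v.toNat < g.length
      · rw [if_neg (by rintro ⟨h1, _, _⟩; omega)]
        have hvt : (P + a).toNat = v.toNat := by omega
        rw [hvt, pv_getD_set_self _ _ _ _ hlen, if_pos ⟨by omega, by omega, hlen⟩,
          show v - P = a by omega]
      · rw [List.set_eq_of_length_le (by omega), if_neg (by rintro ⟨_, _, h3⟩; omega),
          if_neg (by rintro ⟨_, _, h3⟩; omega)]
    · have hne : (P + a).toNat ≠ v.toNat := by omega
      rw [pv_getD_set_ne _ _ _ _ _ hne]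
      by_cases hcond : a + 1 ≤ v - P ∧ v - P < N ∧ v.toNat < g.length
      · rw [if_pos hcond, if_pos ⟨by omega, hcond.2.1, hcond.2.2⟩]
      · rw [if_neg hcond, if_neg (by rintro ⟨h1, h2, h3⟩; exact hcond ⟨by omega, h2, h3⟩)]

theorem pvBuildAux (N T : Int) (grid : List (List Int)) (hN : 0 < N) :
    ∀ (n : Nat) (b : Int), 0 ≤ b → (N - b).toNat = n →
    ∀ (g : List (List (Int × Int))) (v : Int), 0 ≤ v →
    ((PySem.List.pyRange b N 1).foldl (fun g curY => pvRow N T grid curY g) g).getD v.toNat []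
      = if N * b ≤ v ∧ v < N * N ∧ v.toNat < g.length then
          g.getD v.toNat [] ++ pvEdges N T grid (PySem.Int.floordiv v N) (PySem.Int.mod v N)
        else g.getD v.toNat [] := by
  intro n
  induction n with
  | zero =>
    intro b hb hn g v hv
    have hbN : N ≤ b := by omega
    have hNb : N * N ≤ N * b := mul_le_mul_of_nonneg_left hbN (le_of_lt hN)
    rw [PySem.List.pyRange_one_eq_nil hbN, List.foldl_nil, if_neg]
    rintro ⟨h1, h2, _⟩; linarith
  | succ n ih =>
    intro b hb hn g v hv
    have hbN : b < N := by omega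
    have hmul : N * (b + 1) = N * b + N := by ring
    have hle : N * (b + 1) ≤ N * N := mul_le_mul_of_nonneg_left (by omega) (le_of_lt hN)
    rw [PySem.List.pyRange_one_cons hbN, List.foldl_cons,
      ih (b + 1) (by omega) (by omega) _ v hv]
    rw [len_pvRow, hmul]
    have hrow : (pvRow N T grid b g).getD v.toNat []
        = if 0 ≤ v - N * b ∧ v - N * b < N ∧ v.toNat < g.length then
            g.getD v.toNat [] ++ pvEdges N T grid b (v - N * b)
          else g.getD v.toNat [] := by
      unfold pvRow
      exact pvRowAux N T grid b hN hb N.toNat 0 le_rfl (by omega) g v hv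
    rw [hrow]
    by_cases hb1 : N * b ≤ v
    · by_cases hrc : v < N * b + N
      · have hvQ : v < N * N := by linarith
        rw [if_neg (by rintro ⟨hx, _, _⟩; linarith)]
        by_cases hlen : v.toNat < g.length
        · have hfd : PySem.Int.floordiv v N = b := by
            rw [PySem.Int.floordiv_eq_iff_of_pos hN]
            have h1 : b * N = N * b := mul_comm b N
            have h2 : (b + 1) * N = N * b + N := by ring
            constructor <;> linarith
          have hmd : PySem.Int.mod v N = v - N * b := by
            have h := PySem.Int.floordiv_mul_add_mod v N
            rw [hfd] at h
            have h1 : b * N = N * b := mul_comm b N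
            linarith
          rw [if_pos ⟨by linarith, by linarith, hlen⟩, if_pos ⟨hb1, hvQ, hlen⟩, hfd, hmd]
        · rw [if_neg (by rintro ⟨_, _, h3⟩; exact hlen h3),
            if_neg (by rintro ⟨_, _, h3⟩; exact hlen h3)]
      · have hC3 : ¬(0 ≤ v - N * b ∧ v - N * b < N ∧ v.toNat < g.length) := by
          rintro ⟨_, h2, _⟩; linarith
        rw [if_neg hC3]
        by_cases hrest : v < N * N ∧ v.toNat < g.length
        · rw [if_pos ⟨by linarith, hrest.1, hrest.2⟩, if_pos ⟨hb1, hrest.1, hrest.2⟩]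
        · rw [if_neg (by rintro ⟨_, h2, h3⟩; exact hrest ⟨h2, h3⟩),
            if_neg (by rintro ⟨_, h2, h3⟩; exact hrest ⟨h2, h3⟩)]
    · rw [if_neg (by rintro ⟨h1, _, _⟩; linarith),
        if_neg (by rintro ⟨h1, _, _⟩; linarith),
        if_neg (by rintro ⟨h1, _, _⟩; exact hb1 h1)]

theorem pvBuildGraph_getD (N T : Int) (grid : List (List Int)) (hN : 0 < N) (v : Int)
    (hv0 : 0 ≤ v) (hv : v < N * N) :
    PySem.List.pyGetD (pvBuildGraph N T grid) v [] =
      pvEdges N T grid (PySem.Int.floordiv v N) (PySem.Int.mod v N) := by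
  have hNN : 0 < N * N := mul_pos hN hN
  have hg0 : ∀ (i : Nat), ((PySem.List.pyRange 0 (N * N) 1).map (fun _ => ([] : List (Int × Int)))).getD i [] = [] := by
    intro i
    rcases pv_mem_getD ((PySem.List.pyRange 0 (N * N) 1).map (fun _ => ([] : List (Int × Int)))) i [] with h | h
    · rcases List.mem_map.mp h with ⟨w, _, hw⟩
      exact hw.symm
    · exact h
  have hlen : v.toNat < ((PySem.List.pyRange 0 (N * N) 1).map (fun _ => ([] : List (Int × Int)))).length := by
    rw [List.length_map, pv_len_pyRange]
    exact (Int.toNat_lt_toNat hNN).mpr hv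
  rw [PySem.List.pyGetD_of_nonneg _ _ hv0]
  unfold pvBuildGraph
  rw [pvBuildAux N T grid hN N.toNat 0 le_rfl (by omega) _ v hv0,
    if_pos ⟨by simpa using hv0, hv, hlen⟩, hg0]
  simp

theorem pvEdges_bounds (N T : Int) (grid : List (List Int)) (y x : Int) (hN : 0 < N) :
    ∀ e ∈ pvEdges N T grid y x, 0 ≤ e.2 ∧ e.2 < N * N := by
  intro e he
  unfold pvEdges at he
  rcases List.mem_filterMap.mp he with ⟨i, _, hi⟩
  simp only [] at hi
  split_ifs at hi with hc
  · rcases Option.some.inj hi with rfl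
    obtain ⟨⟨hx0, hxN⟩, ⟨hy0, hyN⟩⟩ := hc
    constructor
    · have := mul_nonneg (le_of_lt hN) hy0
      simp only []
      linarith
    · simp only []
      have h1 : N * (y + PySem.List.pyGetD pvDy i 0) + (x + PySem.List.pyGetD pvDx i 0)
          < N * ((y + PySem.List.pyGetD pvDy i 0) + 1) := by
        have := mul_add N (y + PySem.List.pyGetD pvDy i 0) 1
        linarith [this]
      have h2 : N * ((y + PySem.List.pyGetD pvDy i 0) + 1) ≤ N * N :=
        mul_le_mul_of_nonneg_left (by linarith) (le_of_lt hN)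
      linarith

-- ---- heap permutation lemmas ----

theorem pv_eraseIdx_append {α : Type} (l : List α) (a : α) :
    (l ++ [a]).eraseIdx l.length = l := by
  induction l with
  | nil => rfl
  | cons b t ih => simpa [List.eraseIdx] using ih

theorem pv_swap_erase {α : Type} (l : List α) (i j : Nat) (hi : i < l.length) (hj : j < l.length)
    (hij : i ≠ j) : ((l.set i l[j]).eraseIdx j).Perm (l.eraseIdx i) := by
  have hj' : j < (l.set i l[j]).length := by rw [List.length_set]; exact hj
  have h2 := List.getElem_cons_eraseIdx_perm hj'
  have hg : (l.set i l[j])[j] = l[j] := List.getElem_set_ne hij _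
  rw [hg] at h2
  have h1 := List.set_perm_cons_eraseIdx hi l[j]
  exact (h2.trans h1).cons_inv

theorem pv_sum_set (l : List Int) (i : Nat) (a : Int) (h : i < l.length) :
    (l.set i a).sum + l[i] = l.sum + a := by
  have h1 := (List.set_perm_cons_eraseIdx h a).sum_eq
  have h2 := (List.getElem_cons_eraseIdx_perm h).sum_eq
  simp only [List.sum_cons] at h1 h2
  linarith

theorem pv_siftdown_perm : ∀ (fuel : Nat) (heap : List (Int × Int)) (sp pos : Nat) (item : Int × Int),
    pos < heap.length → (pvSiftdown fuel heap sp pos item).Perm (item :: heap.eraseIdx pos) := by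
  intro fuel
  induction fuel with
  | zero => intro heap sp pos item h; exact List.set_perm_cons_eraseIdx h item
  | succ fuel ih =>
    intro heap sp pos item h
    simp only [pvSiftdown]
    split_ifs with h1 h2
    · have hpp : (pos - 1) / 2 < heap.length := by omega
      have hne : pos ≠ (pos - 1) / 2 := by omega
      rw [List.getD_eq_getElem _ _ hpp]
      have hrec := ih (heap.set pos heap[(pos - 1) / 2]) sp ((pos - 1) / 2) item
        (by rw [List.length_set]; exact hpp)
      exact hrec.trans (List.Perm.cons _ (pv_swap_erase heap pos ((pos - 1) / 2) h hpp hne))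
    · exact List.set_perm_cons_eraseIdx h item
    · exact List.set_perm_cons_eraseIdx h item

theorem pv_heappush_perm (heap : List (Int × Int)) (item : Int × Int) :
    (pvHeappush heap item).Perm (item :: heap) := by
  unfold pvHeappush
  have h : heap.length < (heap ++ [item]).length := by simp
  have := pv_siftdown_perm heap.length (heap ++ [item]) 0 heap.length item h
  rwa [pv_eraseIdx_append] at this

theorem pv_siftupLoop_perm : ∀ (fuel : Nat) (heap : List (Int × Int)) (sp pos : Nat) (item : Int × Int),
    pos < heap.length → (pvSiftupLoop fuel heap sp pos item heap.length).Perm (item :: heap.eraseIdx pos) := by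
  intro fuel
  induction fuel with
  | zero => intro heap sp pos item h; exact List.set_perm_cons_eraseIdx h item
  | succ fuel ih =>
    intro heap sp pos item h
    simp only [pvSiftupLoop]
    by_cases h1 : 2 * pos + 1 < heap.length
    · rw [if_pos h1]
      by_cases h2 : 2 * pos + 1 + 1 < heap.length ∧
          pvLt (heap.getD (2 * pos + 1) (0, 0)) (heap.getD (2 * pos + 1 + 1) (0, 0)) = false
      · rw [if_pos h2, List.getD_eq_getElem _ _ h2.1]
        have hrec := ih (heap.set pos heap[2 * pos + 1 + 1]) sp (2 * pos + 1 + 1) item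
          (by rw [List.length_set]; exact h2.1)
        rw [List.length_set] at hrec
        exact hrec.trans (List.Perm.cons _ (pv_swap_erase heap pos (2 * pos + 1 + 1) h h2.1 (by omega)))
      · rw [if_neg h2, List.getD_eq_getElem _ _ h1]
        have hrec := ih (heap.set pos heap[2 * pos + 1]) sp (2 * pos + 1) item
          (by rw [List.length_set]; exact h1)
        rw [List.length_set] at hrec
        exact hrec.trans (List.Perm.cons _ (pv_swap_erase heap pos (2 * pos + 1) h h1 (by omega)))
    · rw [if_neg h1]
      have := pv_siftdown_perm pos (heap.set pos item) sp pos item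
        (by rw [List.length_set]; exact h)
      rwa [List.eraseIdx_set_eq] at this

theorem pv_heappop_none (heap : List (Int × Int)) : pvHeappop heap = none ↔ heap = [] := by
  unfold pvHeappop
  cases hl : heap.getLast? with
  | none => simpa using List.getLast?_eq_none_iff.mp hl
  | some last =>
    simp only []
    constructor
    · intro hcontra
      split_ifs at hcontra
    · intro hnil; rw [hnil] at hl; cases hl

theorem pv_heappop_perm (heap : List (Int × Int)) (r : Int × Int) (rest : List (Int × Int))
    (h : pvHeappop heap = some (r, rest)) : heap.Perm (r :: rest) := by
  unfold pvHeappop at h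
  cases hl : heap.getLast? with
  | none => rw [hl] at h; cases h
  | some last =>
    rw [hl] at h
    have hsplit : heap.dropLast ++ [last] = heap := List.dropLast_append_getLast? last hl
    simp only [] at h
    split_ifs at h with he
    · simp only [Option.some.injEq, Prod.mk.injEq] at h
      obtain ⟨rfl, rfl⟩ := h
      have hd : heap.dropLast = [] := List.isEmpty_iff.mp he
      have hh : heap = [last] := by rw [← hsplit, hd]; simp
      rw [hd, hh]
    · have hd0 : 0 < heap.dropLast.length := by
        cases hdl : heap.dropLast with
        | nil => rw [hdl] at he; exact absurd rfl he
        | cons a t => simp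
      simp only [Option.some.injEq, Prod.mk.injEq] at h
      obtain ⟨rfl, rfl⟩ := h
      have hl0 : 0 < (heap.dropLast.set 0 last).length := by rw [List.length_set]; exact hd0
      have hitem : (heap.dropLast.set 0 last).getD 0 (0, 0) = last := by
        rw [List.getD_eq_getElem _ _ hl0]
        exact List.getElem_set_self hl0
      have hperm : (pvSiftup (heap.dropLast.set 0 last) 0).Perm (last :: heap.dropLast.eraseIdx 0) := by
        unfold pvSiftup
        rw [hitem]
        have := pv_siftupLoop_perm (heap.dropLast.set 0 last).length (heap.dropLast.set 0 last)
          0 0 last hl0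
        rwa [List.eraseIdx_set_eq] at this
      have hr : heap.dropLast.getD 0 (0, 0) = heap.dropLast[0] := List.getD_eq_getElem _ _ hd0
      rw [hr]
      have p1 : heap.Perm (last :: heap.dropLast) := by
        conv_lhs => rw [← hsplit]
        exact List.perm_append_singleton last heap.dropLast
      have p2 : (last :: heap.dropLast).Perm (last :: heap.dropLast[0] :: heap.dropLast.eraseIdx 0) :=
        List.Perm.cons _ (List.getElem_cons_eraseIdx_perm hd0).symm
      have p3 : (last :: heap.dropLast[0] :: heap.dropLast.eraseIdx 0).Perm
          (heap.dropLast[0] :: last :: heap.dropLast.eraseIdx 0) := List.Perm.swap _ _ _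
      have p4 : (heap.dropLast[0] :: last :: heap.dropLast.eraseIdx 0).Perm
          (heap.dropLast[0] :: pvSiftup (heap.dropLast.set 0 last) 0) :=
        List.Perm.cons _ hperm.symm
      exact p1.trans (p2.trans (p3.trans p4))

-- ---- edge facts ----

theorem pv_edge_mem (N T : Int) (grid : List (List Int)) (u : Int) (hu0 : 0 ≤ u) (hu : u < N * N)
    (e : Int × Int) :
    e ∈ pvEdges N T grid (PySem.Int.floordiv u N) (PySem.Int.mod u N) ↔ pvEdge N T grid u e.2 e.1 := by
  constructor
  · intro h; exact ⟨hu0, hu, h⟩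
  · intro h; exact h.2.2

theorem pv_edge_target (N T : Int) (grid : List (List Int)) (u v w : Int) (hN : 0 < N)
    (h : pvEdge N T grid u v w) : 0 ≤ v ∧ v < N * N :=
  pvEdges_bounds N T grid _ _ hN (w, v) h.2.2

theorem pv_dxdy_ne : ∀ i : Int, 0 ≤ i → i < 16 →
    ¬(PySem.List.pyGetD pvDx i 0 = 0 ∧ PySem.List.pyGetD pvDy i 0 = 0) := by
  intro i h1 h2
  interval_cases i <;> decide

theorem pv_edges_coords (N T : Int) (grid : List (List Int)) (y x : Int) (e : Int × Int)
    (h : e ∈ pvEdges N T grid y x) :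
    ∃ nx ny : Int, 0 ≤ nx ∧ nx < N ∧ 0 ≤ ny ∧ ny < N ∧ e.2 = N * ny + nx ∧
      (nx ≠ x ∨ ny ≠ y) ∧ e.1 = T * 3 + PySem.List.pyGetD (PySem.List.pyGetD grid ny []) nx 0 := by
  unfold pvEdges at h
  rcases List.mem_filterMap.mp h with ⟨i, hi, hif⟩
  have hib := PySem.List.mem_pyRange_one.mp hi
  simp only [] at hif
  split_ifs at hif with hc
  · rcases Option.some.inj hif with rfl
    refine ⟨x + PySem.List.pyGetD pvDx i 0, y + PySem.List.pyGetD pvDy i 0,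
      hc.1.1, hc.1.2, hc.2.1, hc.2.2, rfl, ?_, rfl⟩
    have := pv_dxdy_ne i (by omega) (by omega)
    by_cases hdx : PySem.List.pyGetD pvDx i 0 = 0
    · right; have hdy : PySem.List.pyGetD pvDy i 0 ≠ 0 := fun hy => this ⟨hdx, hy⟩
      omega
    · left; omega

theorem pv_cell_inj (N x y nx ny : Int) (hN : 0 < N) (hx : 0 ≤ x) (hx2 : x < N)
    (hnx : 0 ≤ nx) (hnx2 : nx < N) (h : N * ny + nx = N * y + x) : nx = x ∧ ny = y := by
  rcases lt_trichotomy ny y with hlt | heq | hgt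
  · exfalso; nlinarith
  · subst heq; constructor <;> nlinarith
  · exfalso; nlinarith

theorem pv_edge_ne (N T : Int) (grid : List (List Int)) (u v w : Int) (hN : 0 < N)
    (h : pvEdge N T grid u v w) : u ≠ v := by
  obtain ⟨hu0, huN, hmem⟩ := h
  obtain ⟨nx, ny, h1, h2, h3, h4, hv, hne, -⟩ :=
    pv_edges_coords N T grid (PySem.Int.floordiv u N) (PySem.Int.mod u N) (w, v) hmem
  have hrec := PySem.Int.floordiv_mul_add_mod u N
  have hm0 := PySem.Int.mod_nonneg u hN
  have hm1 := PySem.Int.mod_lt u hN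
  intro he
  have hv' : v = N * ny + nx := hv
  have : nx = PySem.Int.mod u N ∧ ny = PySem.Int.floordiv u N :=
    pv_cell_inj N (PySem.Int.mod u N) (PySem.Int.floordiv u N) nx ny hN hm0 hm1 h1 h2
      (by linarith [hv', he, hrec, mul_comm N (PySem.Int.floordiv u N)])
  rcases hne with hne | hne <;> [exact hne this.1; exact hne this.2]

theorem pv_edge_w_nonneg (N T : Int) (grid : List (List Int)) (u v w : Int)
    (hPre : Pre_solve N T grid) (h : pvEdge N T grid u v w) : 0 ≤ w := by
  obtain ⟨hN2, hgl, hrows⟩ := hPre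
  obtain ⟨hu0, huN, hmem⟩ := h
  obtain ⟨nx, ny, h1, h2, h3, h4, hv, -, hw⟩ :=
    pv_edges_coords N T grid (PySem.Int.floordiv u N) (PySem.Int.mod u N) (w, v) hmem
  have hnyl : ny.toNat < grid.length := by omega
  have hrowm : grid[ny.toNat] ∈ grid.take N.toNat := by
    have hlt : ny.toNat < (grid.take N.toNat).length := by
      rw [List.length_take]; omega
    have : (grid.take N.toNat)[ny.toNat] = grid[ny.toNat] := List.getElem_take
    rw [← this]; exact List.getElem_mem hlt
  obtain ⟨hrl, hcells⟩ := hrows _ hrowm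
  have hnxl : nx.toNat < grid[ny.toNat].length := by omega
  have hcellm : grid[ny.toNat][nx.toNat] ∈ grid[ny.toNat].take N.toNat := by
    have hlt : nx.toNat < (grid[ny.toNat].take N.toNat).length := by
      rw [List.length_take]; omega
    have : (grid[ny.toNat].take N.toNat)[nx.toNat] = grid[ny.toNat][nx.toNat] := List.getElem_take
    rw [← this]; exact List.getElem_mem hlt
  have hcell := hcells _ hcellm
  have hrow : PySem.List.pyGetD grid ny [] = grid[ny.toNat] := by
    rw [PySem.List.pyGetD_of_nonneg _ _ h3, List.getD_eq_getElem _ _ hnyl]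
  have hcv : PySem.List.pyGetD (PySem.List.pyGetD grid ny []) nx 0 = grid[ny.toNat][nx.toNat] := by
    rw [hrow, PySem.List.pyGetD_of_nonneg _ _ h1, List.getD_eq_getElem _ _ hnxl]
  have hw' : w = T * 3 + PySem.List.pyGetD (PySem.List.pyGetD grid ny []) nx 0 := hw
  rw [hw', hcv]
  linarith

theorem pv_reach_bounds (N T : Int) (grid : List (List Int)) (v c : Int)
    (hPre : Pre_solve N T grid) (h : pvReach N T grid v c) : 0 ≤ c ∧ 0 ≤ v ∧ v < N * N := by
  have hN : 0 < N := by obtain ⟨h2, -, -⟩ := hPre; omega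
  induction h with
  | zero => exact ⟨le_refl 0, le_refl 0, mul_pos hN hN⟩
  | step hr he ih =>
    refine ⟨?_, pv_edge_target N T grid _ _ _ hN he⟩
    have := pv_edge_w_nonneg N T grid _ _ _ hPre he
    linarith [ih.1]

theorem pv_fix_le (N T : Int) (grid : List (List Int)) (d : List Int)
    (h0 : pvDg d 0 = 0)
    (hfix : ∀ u v w : Int, pvEdge N T grid u v w → pvDg d v ≤ pvDg d u + w) :
    ∀ v c : Int, pvReach N T grid v c → pvDg d v ≤ c := by
  intro v c h
  induction h with
  | zero => rw [h0]
  | step hr he ih =>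
    have := hfix _ _ _ he
    linarith

theorem pv_post_uniq (N T : Int) (grid : List (List Int)) (d1 d2 : List Int)
    (h1 : pvPost N T grid d1) (h2 : pvPost N T grid d2) : d1 = d2 := by
  obtain ⟨⟨hl1, h01, hb1⟩, hf1⟩ := h1
  obtain ⟨⟨hl2, h02, hb2⟩, hf2⟩ := h2
  have key : ∀ v : Int, 0 ≤ v → v < N * N → pvDg d1 v = pvDg d2 v := by
    intro v hv0 hv
    have le12 : pvDg d1 v ≤ pvDg d2 v := by
      rcases (hb2 v hv0 hv).2.2 with hINF | hr
      · rw [hINF]; exact (hb1 v hv0 hv).2.1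
      · exact pv_fix_le N T grid d1 h01 hf1 v _ hr
    have le21 : pvDg d2 v ≤ pvDg d1 v := by
      rcases (hb1 v hv0 hv).2.2 with hINF | hr
      · rw [hINF]; exact (hb2 v hv0 hv).2.1
      · exact pv_fix_le N T grid d2 h02 hf2 v _ hr
    omega
  apply List.ext_getElem (by rw [hl1, hl2])
  intro i hi1 hi2
  have hvN : (i : Int) < N * N := by rw [hl1] at hi1; omega
  have := key i (by positivity) hvN
  unfold pvDg at this
  rw [Int.toNat_natCast, List.getD_eq_getElem _ _ hi1, List.getD_eq_getElem _ _ hi2] at this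
  exact this

-- ---- invariants of the two loops ----

def pvQA (pq : List (Int × Int)) (N T : Int) (grid : List (List Int)) (d : List Int) : Prop :=
  ∀ p ∈ pq, 0 ≤ p.2 ∧ p.2 < N * N ∧ pvReach N T grid p.2 p.1 ∧ pvDg d p.2 ≤ p.1

def pvInvA (N T : Int) (grid : List (List Int)) (pq : List (Int × Int)) (d : List Int) : Prop :=
  pvCore N T grid d ∧ pvQA pq N T grid d ∧
  ∀ u v w : Int, pvEdge N T grid u v w → pvDg d v ≤ pvDg d u + w ∨ (pvDg d u, u) ∈ pq

def pvInvB (N T : Int) (grid : List (List Int)) (q : List Int) (d : List Int) : Prop :=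
  pvCore N T grid d ∧ (∀ v ∈ q, 0 ≤ v ∧ v < N * N) ∧
  ∀ u v w : Int, pvEdge N T grid u v w → pvDg d v ≤ pvDg d u + w ∨ u ∈ q

theorem pv_core_sum (N T : Int) (grid : List (List Int)) (d : List Int)
    (h : pvCore N T grid d) : 0 ≤ d.sum ∧ d.sum ≤ ((N * N).toNat : Int) * pvINF := by
  obtain ⟨hl, -, hb⟩ := h
  have hmem : ∀ x ∈ d, 0 ≤ x ∧ x ≤ pvINF := by
    intro x hx
    rcases List.mem_iff_getElem.mp hx with ⟨i, hi, rfl⟩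
    have hvN : (i : Int) < N * N := by rw [hl] at hi; omega
    have := hb i (by positivity) hvN
    unfold pvDg at this
    rw [Int.toNat_natCast, List.getD_eq_getElem _ _ hi] at this
    exact ⟨this.1, this.2.1⟩
  constructor
  · exact List.sum_nonneg (fun x hx => (hmem x hx).1)
  · have := List.sum_le_card_nsmul d pvINF (fun x hx => (hmem x hx).2)
    rw [hl] at this
    simpa [nsmul_eq_mul] using this

theorem pv_dg_nonneg (d : List Int) (v : Int) (hv : 0 ≤ v) :
    PySem.List.pyGetD d v 0 = pvDg d v := PySem.List.pyGetD_of_nonneg _ _ hv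

theorem pv_dg_set_self (d : List Int) (v x : Int) (hlen : v.toNat < d.length) :
    pvDg (pySetI d v x) v = x := pv_getD_set_self _ _ _ _ hlen

theorem pv_dg_set_ne (d : List Int) (v u x : Int) (hu : 0 ≤ u) (hv : 0 ≤ v) (h : u ≠ v) :
    pvDg (pySetI d v x) u = pvDg d u := pv_getD_set_ne _ _ _ _ _ (by omega)

-- conclusions common to one relaxation pass over the edges of a settled vertex u
theorem pv_foldA (N T : Int) (grid : List (List Int)) (hPre : Pre_solve N T grid)
    (u c : Int) (hreach : pvReach N T grid u c) :
    ∀ (E : List (Int × Int)) (pq : List (Int × Int)) (d : List Int),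
      (∀ e ∈ E, pvEdge N T grid u e.2 e.1) →
      pvCore N T grid d → pvQA pq N T grid d → pvDg d u = c →
      pvCore N T grid (E.foldl (pvRelax c) (pq, d)).2 ∧
      pvQA (E.foldl (pvRelax c) (pq, d)).1 N T grid (E.foldl (pvRelax c) (pq, d)).2 ∧
      pvDg (E.foldl (pvRelax c) (pq, d)).2 u = c ∧
      (∀ e ∈ E, pvDg (E.foldl (pvRelax c) (pq, d)).2 e.2 ≤ c + e.1) ∧
      (∀ x y w : Int, pvEdge N T grid x y w →
        (pvDg d y ≤ pvDg d x + w ∨ (pvDg d x, x) ∈ pq) →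
        (pvDg (E.foldl (pvRelax c) (pq, d)).2 y ≤ pvDg (E.foldl (pvRelax c) (pq, d)).2 x + w ∨
          (pvDg (E.foldl (pvRelax c) (pq, d)).2 x, x) ∈ (E.foldl (pvRelax c) (pq, d)).1)) ∧
      (∀ v : Int, 0 ≤ v → pvDg (E.foldl (pvRelax c) (pq, d)).2 v ≤ pvDg d v) ∧
      2 * (E.foldl (pvRelax c) (pq, d)).2.sum + ((E.foldl (pvRelax c) (pq, d)).1.length : Int) ≤
        2 * d.sum + (pq.length : Int) := by
  have hN : 0 < N := by obtain ⟨h2, -, -⟩ := hPre; omega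
  have hc0 : 0 ≤ c := (pv_reach_bounds N T grid u c hPre hreach).1
  intro E
  induction E with
  | nil =>
    intro pq d hE hcore hqa hdu
    simp only [List.foldl_nil]
    exact ⟨hcore, hqa, hdu, by simp, fun x y w _ h => h, fun v _ => le_refl _, by simp⟩
  | cons e E ih =>
    intro pq d hE hcore hqa hdu
    have he : pvEdge N T grid u e.2 e.1 := hE e List.mem_cons_self
    obtain ⟨hv0, hvN⟩ := pv_edge_target N T grid u e.2 e.1 hN he
    have hune : u ≠ e.2 := pv_edge_ne N T grid u e.2 e.1 hN he
    have hw0 : 0 ≤ e.1 := pv_edge_w_nonneg N T grid u e.2 e.1 hPre he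
    have hlen : e.2.toNat < d.length := by
      obtain ⟨hl, -, -⟩ := hcore; rw [hl]; omega
    rw [List.foldl_cons]
    have hstep : pvRelax c (pq, d) e =
        if c + e.1 < pvDg d e.2 then (pvHeappush pq (c + e.1, e.2), pySetI d e.2 (c + e.1))
        else (pq, d) := by
      simp only [pvRelax, pv_dg_nonneg d e.2 hv0]
    by_cases hcond : c + e.1 < pvDg d e.2
    · rw [hstep, if_pos hcond]
      have hreach2 : pvReach N T grid e.2 (c + e.1) := pvReach.step hreach he
      have hd1 : ∀ v : Int, 0 ≤ v → pvDg (pySetI d e.2 (c + e.1)) v =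
          if v = e.2 then c + e.1 else pvDg d v := by
        intro v hv
        by_cases hve : v = e.2
        · rw [if_pos hve, hve, pv_dg_set_self _ _ _ hlen]
        · rw [if_neg hve, pv_dg_set_ne _ _ _ _ hv hv0 hve]
      have hcore1 : pvCore N T grid (pySetI d e.2 (c + e.1)) := by
        obtain ⟨hl, h0, hb⟩ := hcore
        refine ⟨by rw [← hl]; exact List.length_set, ?_, ?_⟩
        · rw [hd1 0 (le_refl 0)]
          split_ifs with h00
        -- e.2 = 0 is impossible: the new value would be negative
          · exfalso
            rw [← h00, h0] at hcond
            linarith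
          · exact h0
        · intro v hv hvN'
          rw [hd1 v hv]
          split_ifs with hve
          · refine ⟨by linarith, ?_, Or.inr (hve ▸ hreach2)⟩
            have := (hb e.2 hv0 hvN).2.1
            linarith
          · exact hb v hv hvN'
      have hqa1 : pvQA (pvHeappush pq (c + e.1, e.2)) N T grid (pySetI d e.2 (c + e.1)) := by
        intro p hp
        rcases List.mem_cons.mp ((pv_heappush_perm pq (c + e.1, e.2)).mem_iff.mp hp) with rfl | hp'
        · exact ⟨hv0, hvN, hreach2, by rw [pv_dg_set_self _ _ _ hlen]⟩
        · obtain ⟨h1, h2, h3, h4⟩ := hqa p hp'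
          refine ⟨h1, h2, h3, ?_⟩
          rw [hd1 p.2 h1]
          split_ifs with hpe
          · rw [hpe] at h4; linarith
          · exact h4
      have hmono1 : ∀ v : Int, 0 ≤ v → pvDg (pySetI d e.2 (c + e.1)) v ≤ pvDg d v := by
        intro v hv
        rw [hd1 v hv]
        split_ifs with hve
        · rw [hve]; linarith
        · exact le_refl _
      have hu0 : 0 ≤ u := (pv_reach_bounds N T grid u c hPre hreach).2.1
      have hdu1 : pvDg (pySetI d e.2 (c + e.1)) u = c := by
        rw [hd1 u hu0, if_neg hune]
        exact hdu
      obtain ⟨hcore2, hqa2, hdgu2, hhead2, htrans2, hmono2, hpot2⟩ :=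
        ih (pvHeappush pq (c + e.1, e.2)) (pySetI d e.2 (c + e.1))
          (fun e' he' => hE e' (List.mem_cons_of_mem _ he')) hcore1 hqa1 hdu1
      refine ⟨hcore2, hqa2, hdgu2, ?_, ?_, ?_, ?_⟩
      · intro e' he'
        rcases List.mem_cons.mp he' with rfl | he''
        · have h1 := hmono2 e'.2 hv0
          have h2 : pvDg (pySetI d e'.2 (c + e'.1)) e'.2 = c + e'.1 := pv_dg_set_self _ _ _ hlen
          linarith
        · exact hhead2 e' he''
      · intro x y w hxy hdisj
        apply htrans2 x y w hxy
        by_cases hxe : x = e.2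
        · right
          rw [hxe, pv_dg_set_self _ _ _ hlen]
          exact (pv_heappush_perm pq (c + e.1, e.2)).mem_iff.mpr List.mem_cons_self
        · have hx0 : 0 ≤ x := hxy.1
          have hdx : pvDg (pySetI d e.2 (c + e.1)) x = pvDg d x := by rw [hd1 x hx0, if_neg hxe]
          rcases hdisj with hsat | hpend
          · left
            rw [hdx]
            have hy0 : 0 ≤ y := (pv_edge_target N T grid x y w hN hxy).1
            exact le_trans (hmono1 y hy0) hsat
          · right
            rw [hdx]
            exact (pv_heappush_perm pq (c + e.1, e.2)).mem_iff.mpr (List.mem_cons_of_mem _ hpend)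
      · intro v hv
        exact le_trans (hmono2 v hv) (hmono1 v hv)
      · have hsum : (pySetI d e.2 (c + e.1)).sum + d[e.2.toNat] = d.sum + (c + e.1) :=
          pv_sum_set d e.2.toNat _ hlen
        have hdge : d[e.2.toNat] = pvDg d e.2 := (List.getD_eq_getElem _ _ hlen).symm
        have hlen1 : (pvHeappush pq (c + e.1, e.2)).length = pq.length + 1 := by
          rw [(pv_heappush_perm pq _).length_eq]; rfl
        rw [hlen1] at hpot2
        have hsle : (pySetI d e.2 (c + e.1)).sum ≤ d.sum - 1 := by
          rw [hdge] at hsum; omega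
        push_cast at hpot2 ⊢
        linarith
    · rw [hstep, if_neg hcond]
      obtain ⟨hcore1, hqa1, hdgu1, hhead, htrans, hmono, hpot⟩ := ih pq d
        (fun e' he' => hE e' (List.mem_cons_of_mem _ he')) hcore hqa hdu
      refine ⟨hcore1, hqa1, hdgu1, ?_, htrans, hmono, hpot⟩
      intro e' he'
      rcases List.mem_cons.mp he' with rfl | he''
      · exact le_trans (hmono e'.2 hv0) (by linarith)
      · exact hhead e' he''

-- B's inner loop, rephrased as a fold over the same edge list
def pvRelaxB (c : Int) (s : List Int × List Int) (e : Int × Int) : List Int × List Int :=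
  if c + e.1 < PySem.List.pyGetD s.2 e.2 0 then
    (if e.2 ∈ s.1 then s.1 else s.1 ++ [e.2], pySetI s.2 e.2 (c + e.1))
  else s

theorem pv_spfa_fold_eq (N T : Int) (grid : List (List Int)) (uy ux du : Int)
    (s : List Int × List Int) :
    (PySem.List.pyRange 0 16 1).foldl (pvSpfaStep N T grid uy ux du) s
      = (pvEdges N T grid uy ux).foldl (pvRelaxB du) s := by
  unfold pvEdges
  rw [List.foldl_filterMap]
  refine List.foldl_ext _ _ s (fun s' i _ => ?_)
  by_cases hc : (0 ≤ ux + PySem.List.pyGetD pvDx i 0 ∧ ux + PySem.List.pyGetD pvDx i 0 < N) ∧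
      (0 ≤ uy + PySem.List.pyGetD pvDy i 0 ∧ uy + PySem.List.pyGetD pvDy i 0 < N)
  · simp only [pvSpfaStep, pvRelaxB, if_pos hc, add_assoc]
  · simp only [pvSpfaStep, if_neg hc]

theorem pv_foldB (N T : Int) (grid : List (List Int)) (hPre : Pre_solve N T grid)
    (u c : Int) (hu0 : 0 ≤ u) (huN : u < N * N)
    (hcre : c = pvINF ∨ pvReach N T grid u c) (hc0 : 0 ≤ c) :
    ∀ (E : List (Int × Int)) (q : List Int) (d : List Int),
      (∀ e ∈ E, pvEdge N T grid u e.2 e.1) →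
      pvCore N T grid d → (∀ v ∈ q, 0 ≤ v ∧ v < N * N) → pvDg d u = c →
      pvCore N T grid (E.foldl (pvRelaxB c) (q, d)).2 ∧
      (∀ v ∈ (E.foldl (pvRelaxB c) (q, d)).1, 0 ≤ v ∧ v < N * N) ∧
      pvDg (E.foldl (pvRelaxB c) (q, d)).2 u = c ∧
      (∀ e ∈ E, pvDg (E.foldl (pvRelaxB c) (q, d)).2 e.2 ≤ c + e.1) ∧
      (∀ x y w : Int, pvEdge N T grid x y w →
        (pvDg d y ≤ pvDg d x + w ∨ x ∈ q) →
        (pvDg (E.foldl (pvRelaxB c) (q, d)).2 y ≤ pvDg (E.foldl (pvRelaxB c) (q, d)).2 x + w ∨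
          x ∈ (E.foldl (pvRelaxB c) (q, d)).1)) ∧
      (∀ v : Int, 0 ≤ v → pvDg (E.foldl (pvRelaxB c) (q, d)).2 v ≤ pvDg d v) ∧
      2 * (E.foldl (pvRelaxB c) (q, d)).2.sum + ((E.foldl (pvRelaxB c) (q, d)).1.length : Int) ≤
        2 * d.sum + (q.length : Int) := by
  have hN : 0 < N := by obtain ⟨h2, -, -⟩ := hPre; omega
  intro E
  induction E with
  | nil =>
    intro q d hE hcore hq hdu
    simp only [List.foldl_nil]
    exact ⟨hcore, hq, hdu, by simp, fun x y w _ h => h, fun v _ => le_refl _, by simp⟩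
  | cons e E ih =>
    intro q d hE hcore hq hdu
    have he : pvEdge N T grid u e.2 e.1 := hE e List.mem_cons_self
    obtain ⟨hv0, hvN⟩ := pv_edge_target N T grid u e.2 e.1 hN he
    have hune : u ≠ e.2 := pv_edge_ne N T grid u e.2 e.1 hN he
    have hw0 : 0 ≤ e.1 := pv_edge_w_nonneg N T grid u e.2 e.1 hPre he
    have hlen : e.2.toNat < d.length := by
      obtain ⟨hl, -, -⟩ := hcore; rw [hl]; omega
    rw [List.foldl_cons]
    have hstep : pvRelaxB c (q, d) e =
        if c + e.1 < pvDg d e.2 then (if e.2 ∈ q then q else q ++ [e.2], pySetI d e.2 (c + e.1))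
        else (q, d) := by
      simp only [pvRelaxB, pv_dg_nonneg d e.2 hv0]
    by_cases hcond : c + e.1 < pvDg d e.2
    · rw [hstep, if_pos hcond]
      have hreach : pvReach N T grid u c := by
        rcases hcre with hINF | hr
        · exfalso
          have := (hcore.2.2 e.2 hv0 hvN).2.1
          rw [hINF] at hcond
          linarith
        · exact hr
      have hreach2 : pvReach N T grid e.2 (c + e.1) := pvReach.step hreach he
      have hd1 : ∀ v : Int, 0 ≤ v → pvDg (pySetI d e.2 (c + e.1)) v =
          if v = e.2 then c + e.1 else pvDg d v := by
        intro v hv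
        by_cases hve : v = e.2
        · rw [if_pos hve, hve, pv_dg_set_self _ _ _ hlen]
        · rw [if_neg hve, pv_dg_set_ne _ _ _ _ hv hv0 hve]
      have hcore1 : pvCore N T grid (pySetI d e.2 (c + e.1)) := by
        obtain ⟨hl, h0, hb⟩ := hcore
        refine ⟨by rw [← hl]; exact List.length_set, ?_, ?_⟩
        · rw [hd1 0 (le_refl 0)]
          split_ifs with h00
          · exfalso
            rw [← h00, h0] at hcond
            linarith
          · exact h0
        · intro v hv hvN'
          rw [hd1 v hv]
          split_ifs with hve
          · refine ⟨by linarith, ?_, Or.inr (hve ▸ hreach2)⟩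
            have := (hb e.2 hv0 hvN).2.1
            linarith
          · exact hb v hv hvN'
      have hq1 : ∀ v ∈ (if e.2 ∈ q then q else q ++ [e.2]), 0 ≤ v ∧ v < N * N := by
        intro v hv
        split_ifs at hv with hin
        · exact hq v hv
        · rcases List.mem_append.mp hv with hv' | hv'
          · exact hq v hv'
          · rw [List.mem_singleton.mp hv']; exact ⟨hv0, hvN⟩
      have hmono1 : ∀ v : Int, 0 ≤ v → pvDg (pySetI d e.2 (c + e.1)) v ≤ pvDg d v := by
        intro v hv
        rw [hd1 v hv]
        split_ifs with hve
        · rw [hve]; linarith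
        · exact le_refl _
      have hdu1 : pvDg (pySetI d e.2 (c + e.1)) u = c := by
        rw [hd1 u hu0, if_neg hune]
        exact hdu
      obtain ⟨hcore2, hq2, hdgu2, hhead2, htrans2, hmono2, hpot2⟩ :=
        ih (if e.2 ∈ q then q else q ++ [e.2]) (pySetI d e.2 (c + e.1))
          (fun e' he' => hE e' (List.mem_cons_of_mem _ he')) hcore1 hq1 hdu1
      refine ⟨hcore2, hq2, hdgu2, ?_, ?_, ?_, ?_⟩
      · intro e' he'
        rcases List.mem_cons.mp he' with rfl | he''
        · have h1 := hmono2 e'.2 hv0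
          have h2 : pvDg (pySetI d e'.2 (c + e'.1)) e'.2 = c + e'.1 := pv_dg_set_self _ _ _ hlen
          linarith
        · exact hhead2 e' he''
      · intro x y w hxy hdisj
        apply htrans2 x y w hxy
        by_cases hxe : x = e.2
        · right
          rw [hxe]
          split_ifs with hin
          · exact hin
          · exact List.mem_append_right _ (List.mem_singleton_self e.2)
        · have hx0 : 0 ≤ x := hxy.1
          have hdx : pvDg (pySetI d e.2 (c + e.1)) x = pvDg d x := by rw [hd1 x hx0, if_neg hxe]
          rcases hdisj with hsat | hpend
          · left
            rw [hdx]
            have hy0 : 0 ≤ y := (pv_edge_target N T grid x y w hN hxy).1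
            exact le_trans (hmono1 y hy0) hsat
          · right
            split_ifs with hin
            · exact hpend
            · exact List.mem_append_left _ hpend
      · intro v hv
        exact le_trans (hmono2 v hv) (hmono1 v hv)
      · have hsum : (pySetI d e.2 (c + e.1)).sum + d[e.2.toNat] = d.sum + (c + e.1) :=
          pv_sum_set d e.2.toNat _ hlen
        have hdge : d[e.2.toNat] = pvDg d e.2 := (List.getD_eq_getElem _ _ hlen).symm
        have hlen1 : (if e.2 ∈ q then q else q ++ [e.2]).length ≤ q.length + 1 := by
          split_ifs <;> simp
        have hsle : (pySetI d e.2 (c + e.1)).sum ≤ d.sum - 1 := by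
          rw [hdge] at hsum; omega
        have hc2 : ((if e.2 ∈ q then q else q ++ [e.2]).length : Int) ≤ (q.length : Int) + 1 := by
          exact_mod_cast hlen1
        linarith
    · rw [hstep, if_neg hcond]
      obtain ⟨hcore1, hq1, hdgu1, hhead, htrans, hmono, hpot⟩ := ih q d
        (fun e' he' => hE e' (List.mem_cons_of_mem _ he')) hcore hq hdu
      refine ⟨hcore1, hq1, hdgu1, ?_, htrans, hmono, hpot⟩
      intro e' he'
      rcases List.mem_cons.mp he' with rfl | he''
      · exact le_trans (hmono e'.2 hv0) (by linarith)
      · exact hhead e' he''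

theorem pv_loopA (N T : Int) (grid : List (List Int)) (hPre : Pre_solve N T grid) :
    ∀ (fuel : Nat) (pq : List (Int × Int)) (d : List Int),
      pvInvA N T grid pq d → 2 * d.sum + (pq.length : Int) ≤ (fuel : Int) →
      pvPost N T grid (pvDijkstraLoop (pvBuildGraph N T grid) fuel pq d) := by
  have hN : 0 < N := by obtain ⟨h2, -, -⟩ := hPre; omega
  intro fuel
  induction fuel with
  | zero =>
    intro pq d hInv hpot
    obtain ⟨hcore, hqa, hfix⟩ := hInv
    have hsum := (pv_core_sum N T grid d hcore).1
    have hpq : pq = [] := by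
      have h1 : pq.length = 0 := by
        by_contra hne
        have : (1 : Int) ≤ (pq.length : Int) := by
          have : 1 ≤ pq.length := Nat.one_le_iff_ne_zero.mpr hne
          exact_mod_cast this
        push_cast at hpot
        linarith
      exact List.length_eq_zero_iff.mp h1
    subst hpq
    exact ⟨hcore, fun u v w he => (hfix u v w he).resolve_right (by simp)⟩
  | succ fuel ih =>
    intro pq d hInv hpot
    obtain ⟨hcore, hqa, hfix⟩ := hInv
    simp only [pvDijkstraLoop]
    cases hpop : pvHeappop pq with
    | none =>
      have hpq := (pv_heappop_none pq).mp hpop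
      subst hpq
      exact ⟨hcore, fun u v w he => (hfix u v w he).resolve_right (by simp)⟩
    | some pr =>
      obtain ⟨⟨c, u⟩, pq'⟩ := pr
      have hperm := pv_heappop_perm pq _ _ hpop
      have hmem : (c, u) ∈ pq := hperm.mem_iff.mpr List.mem_cons_self
      obtain ⟨hu0, huN, hreach, hdle⟩ := hqa _ hmem
      have hlenq : (pq.length : Int) = (pq'.length : Int) + 1 := by
        rw [hperm.length_eq]; push_cast [List.length_cons]; ring
      have hqa' : pvQA pq' N T grid d := fun p hp =>
        hqa p (hperm.mem_iff.mpr (List.mem_cons_of_mem _ hp))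
      simp only [pv_dg_nonneg d u hu0]
      by_cases hskip : pvDg d u < c
      · rw [if_pos hskip]
        refine ih pq' d ⟨hcore, hqa', ?_⟩ ?_
        · intro x y w he
          rcases hfix x y w he with hsat | hpend
          · exact Or.inl hsat
          · rcases List.mem_cons.mp (hperm.mem_iff.mp hpend) with heq | hp'
            · exfalso
              have hx : x = u := congrArg Prod.snd heq
              have hd : pvDg d x = c := congrArg Prod.fst heq
              rw [hx] at hd
              linarith
            · exact Or.inr hp'
        · push_cast at hpot ⊢
          linarith
      · rw [if_neg hskip]
        have hdu : pvDg d u = c := le_antisymm hdle (not_lt.mp hskip)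
        rw [pvBuildGraph_getD N T grid hN u hu0 huN]
        obtain ⟨hcore1, hqa1, hdgu1, hhead, htrans, hmono, hpot1⟩ :=
          pv_foldA N T grid hPre u c hreach
            (pvEdges N T grid (PySem.Int.floordiv u N) (PySem.Int.mod u N)) pq' d
            (fun e he => (pv_edge_mem N T grid u hu0 huN e).mp he) hcore hqa' hdu
        refine ih _ _ ⟨hcore1, hqa1, ?_⟩ ?_
        · intro x y w he
          by_cases hxu : x = u
          · left
            rw [hxu, hdgu1]
            exact hhead (w, y) ((pv_edge_mem N T grid u hu0 huN (w, y)).mpr (hxu ▸ he))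
          · refine htrans x y w he ?_
            rcases hfix x y w he with hsat | hpend
            · exact Or.inl hsat
            · rcases List.mem_cons.mp (hperm.mem_iff.mp hpend) with heq | hp'
              · exact absurd (congrArg Prod.snd heq) hxu
              · exact Or.inr hp'
        · push_cast at hpot ⊢
          linarith

theorem pv_loopB (N T : Int) (grid : List (List Int)) (hPre : Pre_solve N T grid) :
    ∀ (fuel : Nat) (q : List Int) (d : List Int),
      pvInvB N T grid q d → 2 * d.sum + (q.length : Int) ≤ (fuel : Int) →
      pvPost N T grid (pvSpfaLoop N T grid fuel q d) := by
  have hN : 0 < N := by obtain ⟨h2, -, -⟩ := hPre; omega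
  intro fuel
  induction fuel with
  | zero =>
    intro q d hInv hpot
    obtain ⟨hcore, hq, hfix⟩ := hInv
    have hsum := (pv_core_sum N T grid d hcore).1
    have hpq : q = [] := by
      have h1 : q.length = 0 := by
        by_contra hne
        have : (1 : Int) ≤ (q.length : Int) := by
          have : 1 ≤ q.length := Nat.one_le_iff_ne_zero.mpr hne
          exact_mod_cast this
        push_cast at hpot
        linarith
      exact List.length_eq_zero_iff.mp h1
    subst hpq
    exact ⟨hcore, fun u v w he => (hfix u v w he).resolve_right (by simp)⟩
  | succ fuel ih =>
    intro q d hInv hpot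
    obtain ⟨hcore, hq, hfix⟩ := hInv
    cases q with
    | nil =>
      simp only [pvSpfaLoop]
      exact ⟨hcore, fun u v w he => (hfix u v w he).resolve_right (by simp)⟩
    | cons u q' =>
      simp only [pvSpfaLoop]
      obtain ⟨hu0, huN⟩ := hq u List.mem_cons_self
      have hq' : ∀ v ∈ q', 0 ≤ v ∧ v < N * N := fun v hv => hq v (List.mem_cons_of_mem _ hv)
      rw [pv_spfa_fold_eq]
      simp only [pv_dg_nonneg d u hu0]
      have hbd := hcore.2.2 u hu0 huN
      obtain ⟨hcore1, hq1, hdgu1, hhead, htrans, hmono, hpot1⟩ :=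
        pv_foldB N T grid hPre u (pvDg d u) hu0 huN hbd.2.2 hbd.1
          (pvEdges N T grid (PySem.Int.floordiv u N) (PySem.Int.mod u N)) q' d
          (fun e he => (pv_edge_mem N T grid u hu0 huN e).mp he) hcore hq' rfl
      refine ih _ _ ⟨hcore1, hq1, ?_⟩ ?_
      · intro x y w he
        by_cases hxu : x = u
        · left
          rw [hxu, hdgu1]
          exact hhead (w, y) ((pv_edge_mem N T grid u hu0 huN (w, y)).mpr (hxu ▸ he))
        · refine htrans x y w he ?_
          rcases hfix x y w he with hsat | hpend
          · exact Or.inl hsat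
          · rcases List.mem_cons.mp hpend with heq | hp'
            · exact absurd heq hxu
            · exact Or.inr hp'
      · push_cast [List.length_cons] at hpot ⊢
        linarith

theorem pv_init_dg (N : Int) (hNN : 0 < N * N) :
    ∀ v : Int, 0 ≤ v → v < N * N →
      pvDg (pySetI (List.replicate (N * N).toNat pvINF) 0 0) v = if v = 0 then 0 else pvINF := by
  intro v hv0 hvN
  have hlen : (0 : Int).toNat < (List.replicate (N * N).toNat pvINF).length := by
    rw [List.length_replicate]; omega
  by_cases hv : v = 0
  · rw [if_pos hv, hv, pv_dg_set_self _ _ _ hlen]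
  · rw [if_neg hv, pv_dg_set_ne _ 0 v 0 hv0 (le_refl 0) hv]
    unfold pvDg
    have h1 : v.toNat < (List.replicate (N * N).toNat pvINF).length := by
      rw [List.length_replicate]; omega
    rw [List.getD_eq_getElem _ _ h1, List.getElem_replicate]

theorem pv_init_core (N T : Int) (grid : List (List Int)) (hPre : Pre_solve N T grid) :
    pvCore N T grid (pySetI (List.replicate (N * N).toNat pvINF) 0 0) := by
  have hN : 0 < N := by obtain ⟨h2, -, -⟩ := hPre; omega
  have hNN : 0 < N * N := mul_pos hN hN
  refine ⟨?_, ?_, ?_⟩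
  · show (List.set _ _ _).length = _
    rw [List.length_set, List.length_replicate]
  · rw [pv_init_dg N hNN 0 le_rfl hNN, if_pos rfl]
  · intro v hv0 hvN
    rw [pv_init_dg N hNN v hv0 hvN]
    split_ifs with hv
    · exact ⟨le_rfl, by norm_num [pvINF], Or.inr (by rw [hv]; exact pvReach.zero)⟩
    · exact ⟨by norm_num [pvINF], le_rfl, Or.inl rfl⟩

theorem pv_init_fix (N T : Int) (grid : List (List Int)) (hPre : Pre_solve N T grid) :
    ∀ u v w : Int, pvEdge N T grid u v w →
      pvDg (pySetI (List.replicate (N * N).toNat pvINF) 0 0) v ≤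
        pvDg (pySetI (List.replicate (N * N).toNat pvINF) 0 0) u + w ∨ u = 0 := by
  have hN : 0 < N := by obtain ⟨h2, -, -⟩ := hPre; omega
  have hNN : 0 < N * N := mul_pos hN hN
  intro u v w he
  by_cases hu : u = 0
  · exact Or.inr hu
  · left
    have hw := pv_edge_w_nonneg N T grid u v w hPre he
    obtain ⟨hv0, hvN⟩ := pv_edge_target N T grid u v w hN he
    obtain ⟨hu0, huN, -⟩ := he
    rw [pv_init_dg N hNN u hu0 huN, if_neg hu, pv_init_dg N hNN v hv0 hvN]
    have hINF : (0 : Int) ≤ pvINF := by norm_num [pvINF]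
    split_ifs with hv
    · linarith
    · linarith

theorem pv_init_pot (N T : Int) (grid : List (List Int)) (hDom : Dom_solve N T grid)
    (hPre : Pre_solve N T grid) :
    2 * (pySetI (List.replicate (N * N).toNat pvINF) 0 0).sum + 1 ≤ ((pvFuel : Nat) : Int) := by
  have hN : 0 < N := by obtain ⟨h2, -, -⟩ := hPre; omega
  have hsum := (pv_core_sum N T grid _ (pv_init_core N T grid hPre)).2
  have hNb : -2147483648 ≤ N ∧ N ≤ 2147483648 := by
    simp only [Dom_solve, Bool.and_eq_true] at hDom
    have h1 := hDom.1.1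
    simpa [pvDomInt, decide_eq_true_eq] using h1
  have hk : ((N * N).toNat : Int) = N * N := Int.toNat_of_nonneg (le_of_lt (mul_pos hN hN))
  have hNN2 : ((N * N).toNat : Int) ≤ 4611686018427387904 := by
    rw [hk]; nlinarith [hNb.1, hNb.2]
  have hINF : (0 : Int) ≤ pvINF := by norm_num [pvINF]
  have h2 : ((N * N).toNat : Int) * pvINF ≤ 4611686018427387904 * pvINF :=
    mul_le_mul_of_nonneg_right hNN2 hINF
  have hfuel : ((pvFuel : Nat) : Int) = 2 ^ 200 := by norm_num [pvFuel]
  have hfin : 2 * ((4611686018427387904 : Int) * pvINF) + 1 ≤ 2 ^ 200 := by norm_num [pvINF]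
  rw [hfuel]
  linarith

theorem pv_postA (N T : Int) (grid : List (List Int)) (hDom : Dom_solve N T grid)
    (hPre : Pre_solve N T grid) :
    pvPost N T grid (pvDijkstra (N * N) (pvBuildGraph N T grid) 0) := by
  have hN : 0 < N := by obtain ⟨h2, -, -⟩ := hPre; omega
  have hNN : 0 < N * N := mul_pos hN hN
  simp only [pvDijkstra]
  have hmap : ((PySem.List.pyRange 0 (N * N) 1).map (fun _ => pvINF)) =
      List.replicate (N * N).toNat pvINF := by
    rw [List.map_const', pv_len_pyRange]
  rw [hmap]
  have hpush : pvHeappush [] ((0 : Int), (0 : Int)) = [((0 : Int), (0 : Int))] := rfl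
  rw [hpush]
  have hdg0 : pvDg (pySetI (List.replicate (N * N).toNat pvINF) 0 0) 0 = 0 :=
    (pv_init_core N T grid hPre).2.1
  apply pv_loopA N T grid hPre
  · refine ⟨pv_init_core N T grid hPre, ?_, ?_⟩
    · intro p hp
      rw [List.mem_singleton.mp hp]
      exact ⟨le_rfl, hNN, pvReach.zero, by rw [hdg0]⟩
    · intro u v w he
      rcases pv_init_fix N T grid hPre u v w he with h | h
      · exact Or.inl h
      · right
        rw [h, hdg0]
        exact List.mem_singleton_self _
  · have := pv_init_pot N T grid hDom hPre
    simp only [List.length_singleton]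
    push_cast
    linarith

theorem pv_postB (N T : Int) (grid : List (List Int)) (hDom : Dom_solve N T grid)
    (hPre : Pre_solve N T grid) :
    pvPost N T grid (pvSpfaLoop N T grid pvFuel [0] (pySetI (List.replicate (N * N).toNat pvINF) 0 0)) := by
  have hN : 0 < N := by obtain ⟨h2, -, -⟩ := hPre; omega
  have hNN : 0 < N * N := mul_pos hN hN
  apply pv_loopB N T grid hPre
  · refine ⟨pv_init_core N T grid hPre, ?_, ?_⟩
    · intro v hv
      rw [List.mem_singleton.mp hv]
      exact ⟨le_rfl, hNN⟩
    · intro u v w he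
      rcases pv_init_fix N T grid hPre u v w he with h | h
      · exact Or.inl h
      · exact Or.inr (by rw [h]; exact List.mem_singleton_self 0)
  · have := pv_init_pot N T grid hDom hPre
    simp only [List.length_singleton]
    push_cast
    linarith

-- ===== VERDICT (by name: the statement is the Claim_ definition above) =====
theorem solve_spec : Claim_equal_solve := by
  intro N T grid hDom hPre
  have hA := pv_postA N T grid hDom hPre
  have hB := pv_postB N T grid hDom hPre
  have heq := pv_post_uniq N T grid _ _ hA hB
  simp only [Spec_solve, solve, solve_alt]
  rw [heq]
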